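-- pv_equiv track=rewrite | github.com/HajimeKawahara/autobop | src/maketakt.py | tie
-- ===== SOURCE A (Python) =====
-- def tie(mseq):
--     pm = mseq[0]
--     for i in range(1, len(mseq)):
--         if pm == mseq[i]:
--             mseq[i]='~'
--         else:
--             pm=mseq[i]
--
--     return mseq
-- ===== SOURCE B (Python) =====
-- def tie(mseq):
--     # group into maximal runs of equal consecutive elements; keep each run's
--     # first element and emit '~' for the rest of the run
--     out = []
--     i = 0
--     n = len(mseq)
--     while i < n:
--         head = mseq[i]
--         j = i + 1
--         while j < n and mseq[j] == head:
--             j += 1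
--         out.append(head)
--         out.extend(['~'] * (j - i - 1))
--         i = j
--     mseq[:] = out
--     return mseq
-- ===== Notes on version B (the rewrite author's own statement) =====
-- stated objective: alternative
-- what changed: B replaces A's single stateful pass (a carried 'previous retained value' pm overwriting elements in place) with run-grouping: an outer loop walks run boundaries, an inner loop scans to the end of each maximal run of equal consecutive elements, and a fresh output list is built as run-head followed by '~' markers, then written back with mseq[:]=.
import Mathlib
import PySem

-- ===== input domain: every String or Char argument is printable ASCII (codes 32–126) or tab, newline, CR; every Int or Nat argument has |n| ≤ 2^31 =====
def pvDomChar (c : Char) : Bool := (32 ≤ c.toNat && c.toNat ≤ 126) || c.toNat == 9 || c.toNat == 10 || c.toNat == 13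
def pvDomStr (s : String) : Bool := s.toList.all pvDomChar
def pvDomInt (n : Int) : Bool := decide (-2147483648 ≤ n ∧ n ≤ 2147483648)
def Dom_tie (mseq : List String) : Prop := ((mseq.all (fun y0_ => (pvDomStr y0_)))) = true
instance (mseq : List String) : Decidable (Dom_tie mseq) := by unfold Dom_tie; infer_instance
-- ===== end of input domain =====

-- B marks consecutive duplicates with "~" by grouping the list into maximal runs of equal
-- consecutive elements (outer loop over run boundaries, inner scan to each run's end) and
-- building a fresh output list, instead of A's single stateful pass overwriting in place;
-- the RETURN value is proved equal (both Pythons also mutate mseq in place).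

-- ===== PORT A =====
-- pm = mseq[0]; for i in range(1, len(mseq)): if pm == mseq[i]: mseq[i]='~' else pm=mseq[i]
def tie (mseq : List String) : List String :=
  match mseq with
  | [] => []            -- Python raises IndexError here; excluded by Pre_tie
  | pm0 :: _ =>
    ((PySem.List.pyRange 1 (mseq.length : Int) 1).foldl
      (fun (st : List String × String) i =>
        let cur := PySem.List.pyGetD st.1 i ""
        if st.2 == cur then (st.1.set i.toNat "~", st.2) else (st.1, cur))
      (mseq, pm0)).1

-- ===== PORT B =====
-- inner loop: 'j = i + 1; while j < n and mseq[j] == head: j += 1'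
def tieRunEnd (mseq : List String) (head : String) (j : Nat) : Nat :=
  if j < mseq.length ∧ mseq.getD j "" == head then tieRunEnd mseq head (j + 1) else j
termination_by mseq.length - j
decreasing_by omega

-- cited by tieLoop's decreasing_by: the inner while never moves j backwards
theorem tieRunEnd_ge (mseq : List String) (head : String) (j : Nat) :
    j ≤ tieRunEnd mseq head j := by
  fun_induction tieRunEnd with
  | case1 _ _ ih => omega
  | case2 => omega

-- outer loop: 'while i < n: … out.append(head); out.extend(['~']*(j-i-1)); i = j'
def tieLoop (mseq : List String) (i : Nat) (out : List String) : List String :=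
  if i < mseq.length then
    let head := mseq.getD i ""
    let j := tieRunEnd mseq head (i + 1)
    tieLoop mseq j (out ++ [head] ++ List.replicate (j - i - 1) "~")
  else out
termination_by mseq.length - i
decreasing_by
  have := tieRunEnd_ge mseq (mseq.getD i "") (i + 1)
  omega

-- out = []; i = 0; <loops>; mseq[:] = out; return mseq
def tie_alt (mseq : List String) : List String := tieLoop mseq 0 []

-- ===== PRECONDITION & SPEC =====
-- Pre_tie excludes only the empty list, on which Python A raises IndexError at mseq[0].
def Pre_tie (mseq : List String) : Prop := mseq ≠ []
instance (mseq : List String) : Decidable (Pre_tie mseq) := by unfold Pre_tie; infer_instance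
def pvWitness_tie : List String := (["a", "a", "b"])

def Spec_tie (mseq : List String) (out : List String) : Prop := out = tie_alt mseq
instance (mseq : List String) (out : List String) : Decidable (Spec_tie mseq out) := by unfold Spec_tie; infer_instance

-- ===== CLAIM (what is proved, stated in full; the proofs are below) =====
def Claim_equal_tie : Prop := ∀ (mseq : List String), Dom_tie mseq → Pre_tie mseq → Spec_tie mseq (tie mseq)

-- ===== LEMMAS AND PROOFS =====

-- proof-side recursive description of B: split off one run at a time
def tieRun (h : String) : List String → Nat
  | [] => 0
  | x :: t => if x == h then 1 + tieRun h t else 0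

theorem tieRun_le (h : String) (t : List String) : tieRun h t ≤ t.length := by
  induction t with
  | nil => simp [tieRun]
  | cons x r ih => simp only [tieRun, List.length_cons]; split <;> omega

def tieExpand (seq : List String) : List String :=
  match seq with
  | [] => []
  | h :: t =>
    let k := tieRun h t
    h :: (List.replicate k "~" ++ tieExpand (t.drop k))
termination_by seq.length
decreasing_by
  have := tieRun_le h t
  simp only [List.length_cons, List.length_drop]
  omega

-- the inner while computes i+1 plus the length of the run continuing at i+1
theorem tieRunEnd_eq (mseq : List String) (head : String) : ∀ (j : Nat),
    tieRunEnd mseq head j = j + tieRun head (mseq.drop j) := by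
  intro j
  fun_induction tieRunEnd with
  | case1 j h ih =>
    obtain ⟨hj, hbeq⟩ := h
    rw [List.drop_eq_getElem_cons hj]
    have : mseq.getD j "" = mseq[j] := by simp [List.getD_eq_getElem?_getD, hj]
    rw [this] at hbeq
    simp only [tieRun, hbeq, if_pos, ih]
    omega
  | case2 j h =>
    by_cases hj : j < mseq.length
    · have hbeq : (mseq[j] == head) = false := by
        have : mseq.getD j "" = mseq[j] := by simp [List.getD_eq_getElem?_getD, hj]
        rcases Bool.eq_false_or_eq_true (mseq[j] == head) with hb | hb
        · exact absurd ⟨hj, by rw [this]; exact hb⟩ h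
        · exact hb
      rw [List.drop_eq_getElem_cons hj]
      simp [tieRun, hbeq]
    · rw [List.drop_eq_nil_of_le (by omega)]
      simp [tieRun]

-- outer-loop invariant: the loop appends the run-expansion of the unprocessed suffix
theorem tieLoop_eq (mseq : List String) : ∀ (i : Nat) (out : List String),
    tieLoop mseq i out = out ++ tieExpand (mseq.drop i) := by
  intro i out
  fun_induction tieLoop with
  | case1 i out hi head j ih =>
    show tieLoop mseq j _ = _
    rw [ih]
    have hhead : mseq.getD i "" = mseq[i] := by simp [List.getD_eq_getElem?_getD, hi]
    have hH : head = mseq[i] := hhead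
    have hj : j = i + 1 + tieRun mseq[i] (mseq.drop (i + 1)) := by
      show tieRunEnd mseq head (i + 1) = _
      rw [tieRunEnd_eq, hH]
    rw [hH, hj]
    have hdrop1 : mseq.drop (i + 1 + tieRun mseq[i] (mseq.drop (i + 1)))
        = (mseq.drop (i + 1)).drop (tieRun mseq[i] (mseq.drop (i + 1))) := by
      rw [List.drop_drop]
    rw [hdrop1, List.drop_eq_getElem_cons hi, tieExpand]
    simp only [List.append_assoc, List.cons_append, List.nil_append]
    congr 4
    omega
  | case2 i out hi =>
    rw [List.drop_eq_nil_of_le (by omega), tieExpand]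
    simp

-- Loop invariant for A's fold: having processed the prefix `pre`, running the loop over
-- the remaining indices rewrites `suf` element-wise against its original predecessor,
-- and the carried pm always equals the last original element seen.
theorem tie_loop_inv (suf : List String) : ∀ (pre : List String) (pm : String),
    ((PySem.List.pyRange (pre.length : Int) ((pre.length + suf.length : Nat) : Int) 1).foldl
      (fun (st : List String × String) i =>
        let cur := PySem.List.pyGetD st.1 i ""
        if st.2 == cur then (st.1.set i.toNat "~", st.2) else (st.1, cur))
      (pre ++ suf, pm))
    = (pre ++ List.zipWith (fun prev cur => if cur == prev then "~" else cur) (pm :: suf) suf,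
       suf.getLastD pm) := by
  induction suf with
  | nil => intro pre pm; simp [PySem.List.pyRange_one_eq_nil]
  | cons c rest ih =>
    intro pre pm
    rw [PySem.List.pyRange_one_cons (by simp)]
    simp only [List.foldl_cons]
    have hget : PySem.List.pyGetD (pre ++ c :: rest) (pre.length : Int) "" = c := by
      simp [PySem.List.pyGetD_natCast]
    by_cases h : pm = c
    · subst h
      simp only [hget, BEq.rfl, if_pos, Int.toNat_natCast]
      have hset : (pre ++ pm :: rest).set pre.length "~" = (pre ++ ["~"]) ++ rest := by
        simp
      rw [hset]
      have hkey := ih (pre ++ ["~"]) pm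
      simp only [List.length_append, List.length_cons, List.length_nil] at hkey ⊢
      rw [show ((pre.length : Int) + 1) = ((pre.length + (0 + 1) : Nat) : Int) by push_cast; ring]
      rw [show pre.length + (rest.length + 1) = pre.length + (0 + 1) + rest.length by ring]
      rw [hkey]
      simp [List.append_assoc, List.getLast?_cons, List.getLastD_eq_getLast?]
    · have hbeq : (pm == c) = false := by simp [h]
      simp only [hget, hbeq, Bool.false_eq_true, if_neg, not_false_iff]
      rw [show pre ++ c :: rest = (pre ++ [c]) ++ rest by simp]
      have hkey := ih (pre ++ [c]) c
      simp only [List.length_append, List.length_cons, List.length_nil] at hkey ⊢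
      rw [show ((pre.length : Int) + 1) = ((pre.length + (0 + 1) : Nat) : Int) by push_cast; ring]
      rw [show pre.length + (rest.length + 1) = pre.length + (0 + 1) + rest.length by ring]
      rw [hkey]
      simp only [List.append_assoc, List.cons_append, List.nil_append, List.zipWith_cons_cons,
        Prod.mk.injEq]
      constructor
      · simp [Ne.symm h]
      · simp [List.getLast?_cons, List.getLastD_eq_getLast?]

-- B's run-splitting also computes the element-against-original-predecessor form
theorem tieExpand_eq_zip (t : List String) : ∀ (h : String),
    tieExpand (h :: t)
      = h :: List.zipWith (fun prev cur => if cur == prev then "~" else cur) (h :: t) t := by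
  induction t with
  | nil => intro h; simp [tieExpand, tieRun]
  | cons x r ih =>
    intro h
    by_cases hx : x = h
    · subst hx
      have hx2 := ih x
      rw [tieExpand] at hx2 ⊢
      simp only [List.cons.injEq, true_and] at hx2
      simp only [tieRun, BEq.rfl, if_pos, Nat.add_comm 1, List.replicate_succ,
        List.drop_succ_cons, List.cons_append, List.zipWith_cons_cons, List.cons.injEq, true_and]
      exact hx2
    · rw [tieExpand]
      have hbeq : (x == h) = false := by simp [hx]
      simp only [tieRun, hbeq, Bool.false_eq_true, if_neg, not_false_iff,
        List.replicate_zero, List.nil_append, List.drop_zero]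
      rw [ih x]
      simp [List.zipWith_cons_cons, hx]

-- ===== VERDICT (by name: the statement is the Claim_ definition above) =====
theorem tie_spec : Claim_equal_tie := by
  intro mseq _ hpre
  unfold Spec_tie tie_alt
  rw [tieLoop_eq, List.drop_zero, List.nil_append]
  match mseq with
  | [] => exact absurd rfl hpre
  | h :: t =>
    have key := tie_loop_inv t [h] h
    simp only [List.length_cons, List.length_nil, Nat.cast_one, List.singleton_append,
      Nat.zero_add] at key
    rw [Nat.add_comm 1 t.length] at key
    simp only [tie, List.length_cons]
    rw [key, tieExpand_eq_zip]
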